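-- pv_equiv track=rewrite | github.com/Runarok/GeeksForGeeks-solutions | Difficulty: Hard/Hexadecimal to decimal counter/hexadecimal-to-decimal-counter.py | countOfDistinctNo
-- ===== SOURCE A (Python) =====
-- def countOfDistinctNo(str: str) -> int:
--     # Get the length of the input string
--     length = len(str)
--
--     # Arrays to store the dynamic programming results and character frequencies
--     dp = [0] * (length + 1)
--     charFrequency = [0] * 256  # To store frequency of each character (ASCII range)
--
--     # Auxiliary DP table for binomial coefficients
--     binomialCoeff = [[0] * (length + 1) for _ in range(length + 1)]
--
--     # Modulo value to prevent overflow
--     mod = 1000000007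
--
--     # Precompute binomial coefficients using Pascal's Triangle
--     for i in range(length + 1):
--         for j in range(i + 1):
--             if j == 0 or j == i:
--                 binomialCoeff[i][j] = 1
--             elif j == 1:
--                 binomialCoeff[i][j] = i
--             else:
--                 binomialCoeff[i][j] = (binomialCoeff[i - 1][j] + binomialCoeff[i - 1][j - 1]) % mod
--
--     # Base case for DP: an empty string has one way to form a number (empty set)
--     dp[0] = 1
--
--     # Count how many zeros are present in the string
--     zeroCount = 0
--     for char in str:
--         if char != '0':
--             charFrequency[ord(char)] += 1
--         else:
--             zeroCount += 1
--
--     # Process each distinct non-zero character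
--     for i in range(256):
--         if charFrequency[i] == 0:
--             continue  # Skip characters that don't appear in the string
--
--         frequency = charFrequency[i]
--
--         # Update the DP table based on character frequency
--         for k in range(length, -1, -1):
--             for j in range(1, frequency + 1):
--                 if k - j < 0:
--                     break
--                 dp[k] = (dp[k] + (dp[k - j] * binomialCoeff[k][k - j]) % mod) % mod
--
--     # Process zeros separately, considering the constraint that numbers can't start with zero
--     for k in range(length, -1, -1):
--         for j in range(1, zeroCount + 1):
--             if k - j <= 0:
--                 break
--             dp[k] = (dp[k] + (dp[k - j] * binomialCoeff[k - 1][k - j - 1]) % mod) % mod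
--
--     # If there are zeros, we need to account for the case where a number starts with a non-zero digit
--     if zeroCount:
--         dp[1] += 1
--
--     # Compute the final sum of distinct numbers by summing up the valid DP results
--     result = 0
--     for i in range(1, length + 1):
--         result = (result + dp[i]) % mod
--
--     return result
-- ===== SOURCE B (Python) =====
-- def countOfDistinctNo(str: str) -> int:
--     # Same DP, but binomial coefficients come from a direct multiplicative
--     # comb() helper instead of a Pascal's-triangle table; break-guarded inner
--     # loops become min-bounded ranges; the final result is sum(dp[1:]).
--     mod = 1000000007
--     n = len(str)
--
--     freq = [0] * 256
--     for ch in str: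
--         freq[ord(ch)] += 1
--     zeroCount = freq[ord('0')]
--     freq[ord('0')] = 0
--
--     def comb(a, b):
--         # exact C(a, b) by the multiplicative formula, then reduced mod
--         if b > a - b:
--             b = a - b
--         num = 1
--         for t in range(b):
--             num = num * (a - t) // (t + 1)
--         return num % mod
--
--     dp = [0] * (n + 1)
--     dp[0] = 1
--     for code in range(256):
--         f = freq[code]
--         for k in range(n, -1, -1):
--             for j in range(1, min(f, k) + 1):
--                 dp[k] = (dp[k] + dp[k - j] * comb(k, j)) % mod
--     for k in range(n, -1, -1):
--         for j in range(1, min(zeroCount, k - 1) + 1):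
--             dp[k] = (dp[k] + dp[k - j] * comb(k - 1, j)) % mod
--     if zeroCount:
--         dp[1] += 1
--     return sum(dp[1:]) % mod
-- ===== Notes on version B (the rewrite author's own statement) =====
-- stated objective: alternative
-- what changed: Replaces the precomputed O(n^2) Pascal's-triangle table with a direct multiplicative comb(a,b) helper evaluated on demand (trading the quadratic table memory for per-update binomial computation), turns the break-guarded inner loops into min-bounded ranges, reads frequencies and the zero count from one counting array, and computes the result as sum(dp[1:]) % mod.
import Mathlib
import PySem

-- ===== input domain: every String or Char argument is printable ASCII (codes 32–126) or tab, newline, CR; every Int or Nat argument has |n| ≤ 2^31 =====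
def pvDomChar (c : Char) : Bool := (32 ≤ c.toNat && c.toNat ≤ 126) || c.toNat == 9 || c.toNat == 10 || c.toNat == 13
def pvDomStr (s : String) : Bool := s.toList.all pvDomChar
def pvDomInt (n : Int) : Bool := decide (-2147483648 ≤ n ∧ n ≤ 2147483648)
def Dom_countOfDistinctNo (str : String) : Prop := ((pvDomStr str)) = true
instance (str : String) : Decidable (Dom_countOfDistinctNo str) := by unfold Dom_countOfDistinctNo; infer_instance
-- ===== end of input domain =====

-- B replaces A's Pascal's-triangle table by an on-demand multiplicative comb helper
-- (trading the quadratic table memory for per-update binomial computation), min-bounded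
-- inner ranges instead of break guards, and sum(dp[1:]) % mod at the end; return values
-- are proved identical on the whole domain.

-- ===== PORT A =====
-- table entry read binomialCoeff[i][j]; indices are nonnegative and in range wherever
-- A reads them, so the getD defaults are never hit
def pvEntryI (t : List (List Int)) (i j : Int) : Int :=
  PySem.List.pyGetD (PySem.List.pyGetD t i []) j 0

def pvSetEntry (t : List (List Int)) (i j : Nat) (v : Int) : List (List Int) :=
  t.set i ((t.getD i []).set j v)

-- body of the Pascal-triangle double loop
def pvBCStep (t : List (List Int)) (i j : Nat) : List (List Int) :=
  if j = 0 ∨ j = i then pvSetEntry t i j 1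
  else if j = 1 then pvSetEntry t i j (i : Int)
  else pvSetEntry t i j
    (((t.getD (i-1) []).getD j 0 + (t.getD (i-1) []).getD (j-1) 0) % 1000000007)

def pvBCRow (t : List (List Int)) (i : Nat) : List (List Int) :=
  (List.range (i+1)).foldl (fun t j => pvBCStep t i j) t

def pvBC (n : Nat) : List (List Int) :=
  (List.range (n+1)).foldl (fun t i => pvBCRow t i)
    (List.replicate (n+1) (List.replicate (n+1) (0 : Int)))

-- the loop counting non-zero character frequencies and zeros, state = (charFrequency, zeroCount)
def pvFreqA (cs : List Char) : List Int × Int :=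
  cs.foldl (fun st ch =>
      if ch ≠ '0' then
        (PySem.List.pySetD st.1 (ch.toNat : Int)
           (PySem.List.pyGetD st.1 (ch.toNat : Int) 0 + 1), st.2)
      else (st.1, st.2 + 1))
    (List.replicate 256 0, 0)

-- inner 'for j in range(1, frequency+1)' loop with its break
def pvInnerA (bc : List (List Int)) (k : Int) (dp : List Int) : List Int → List Int
  | [] => dp
  | j :: js =>
    if k - j < 0 then dp
    else pvInnerA bc k
      (PySem.List.pySetD dp k
        ((PySem.List.pyGetD dp k 0 +
          (PySem.List.pyGetD dp (k-j) 0 * pvEntryI bc k (k-j)) % 1000000007) % 1000000007))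
      js

-- inner zero loop with its break
def pvInnerZ (bc : List (List Int)) (k : Int) (dp : List Int) : List Int → List Int
  | [] => dp
  | j :: js =>
    if k - j ≤ 0 then dp
    else pvInnerZ bc k
      (PySem.List.pySetD dp k
        ((PySem.List.pyGetD dp k 0 +
          (PySem.List.pyGetD dp (k-j) 0 * pvEntryI bc (k-1) (k-j-1)) % 1000000007) % 1000000007))
      js

def countOfDistinctNo (str : String) : Int :=
  let n : Nat := str.toList.length
  let bc := pvBC n
  let dp1 := PySem.List.pySetD (List.replicate (n+1) (0 : Int)) 0 1
  let fr := pvFreqA str.toList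
  let dp2 := (PySem.List.pyRange 0 256).foldl (fun dp i =>
      if PySem.List.pyGetD fr.1 i 0 = 0 then dp
      else
        (PySem.List.pyRange (n : Int) (-1) (-1)).foldl
          (fun dp k => pvInnerA bc k dp (PySem.List.pyRange 1 (PySem.List.pyGetD fr.1 i 0 + 1)))
          dp) dp1
  let dp3 := (PySem.List.pyRange (n : Int) (-1) (-1)).foldl
      (fun dp k => pvInnerZ bc k dp (PySem.List.pyRange 1 (fr.2 + 1))) dp2
  let dp4 := if fr.2 ≠ 0 then PySem.List.pySetD dp3 1 (PySem.List.pyGetD dp3 1 0 + 1) else dp3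
  (PySem.List.pyRange 1 ((n : Int) + 1)).foldl
    (fun r i => (r + PySem.List.pyGetD dp4 i 0) % 1000000007) 0

-- ===== PORT B =====
-- exact C(a,b) by the multiplicative formula, then reduced mod
def pvComb (a b : Int) : Int :=
  let b' := if b > a - b then a - b else b
  ((PySem.List.pyRange 0 b').foldl
    (fun num t => PySem.Int.floordiv (num * (a - t)) (t + 1)) 1) % 1000000007

-- 'for ch in str: freq[ord(ch)] += 1'
def pvFreqB (cs : List Char) : List Int :=
  cs.foldl (fun fq ch =>
      PySem.List.pySetD fq (ch.toNat : Int) (PySem.List.pyGetD fq (ch.toNat : Int) 0 + 1))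
    (List.replicate 256 0)

def countOfDistinctNo_alt (str : String) : Int :=
  let n : Nat := str.toList.length
  let freq0 := pvFreqB str.toList
  let zeroCount := PySem.List.pyGetD freq0 (('0'.toNat : Int)) 0
  let freq := PySem.List.pySetD freq0 (('0'.toNat : Int)) 0
  let dp1 := PySem.List.pySetD (List.replicate (n+1) (0 : Int)) 0 1
  let dp2 := (PySem.List.pyRange 0 256).foldl (fun dp code =>
      (PySem.List.pyRange (n : Int) (-1) (-1)).foldl
        (fun dp k =>
          (PySem.List.pyRange 1 (min (PySem.List.pyGetD freq code 0) k + 1)).foldl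
            (fun dp j =>
              PySem.List.pySetD dp k
                ((PySem.List.pyGetD dp k 0 +
                  PySem.List.pyGetD dp (k-j) 0 * pvComb k j) % 1000000007)) dp)
        dp) dp1
  let dp3 := (PySem.List.pyRange (n : Int) (-1) (-1)).foldl
      (fun dp k =>
        (PySem.List.pyRange 1 (min zeroCount (k-1) + 1)).foldl
          (fun dp j =>
            PySem.List.pySetD dp k
              ((PySem.List.pyGetD dp k 0 +
                PySem.List.pyGetD dp (k-j) 0 * pvComb (k-1) j) % 1000000007)) dp) dp2
  let dp4 := if zeroCount ≠ 0 then PySem.List.pySetD dp3 1 (PySem.List.pyGetD dp3 1 0 + 1) else dp3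
  (PySem.List.slice dp4 (some 1) none).sum % 1000000007

-- ===== PRECONDITION & SPEC =====
def Spec_countOfDistinctNo (str : String) (out : Int) : Prop := out = countOfDistinctNo_alt str
instance (str : String) (out : Int) : Decidable (Spec_countOfDistinctNo str out) := by unfold Spec_countOfDistinctNo; infer_instance

-- ===== CLAIM (what is proved, stated in full; the proofs are below) =====
def Claim_equal_countOfDistinctNo : Prop := ∀ (str : String), Dom_countOfDistinctNo str → Spec_countOfDistinctNo str (countOfDistinctNo str)

-- ===== LEMMAS AND PROOFS =====

-- ---- generic helpers ----

theorem pv_char_ne {c : Char} (h : c ≠ '0') : c.toNat ≠ 48 := by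
  intro hn
  apply h; apply Char.ext; unfold Char.toNat at hn; exact UInt32.toNat_inj.mp hn

theorem pv_getD_set {α : Type} (l : List α) (i j : Nat) (v d : α) (hi : i < l.length) :
    (l.set i v).getD j d = if j = i then v else l.getD j d := by
  by_cases hji : j = i
  · subst hji; simp [List.getD_eq_getElem?_getD, List.getElem?_set_self hi]
  · simp [List.getD_eq_getElem?_getD, List.getElem?_set_ne (fun h => hji h.symm), hji]

theorem pv_getD_nonneg (xs : List Int) (i : Int) (h : ∀ x ∈ xs, 0 ≤ x) :
    0 ≤ PySem.List.pyGetD xs i 0 := by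
  unfold PySem.List.pyGetD
  cases hg : PySem.List.pyGet? xs i with
  | none => simp
  | some x => simpa using h x (PySem.List.mem_of_pyGet?_eq_some xs hg)

theorem pv_valEq (dk dkj T C c : Int) (hT : T % 1000000007 = c % 1000000007)
    (hC : C = c % 1000000007) :
    (dk + (dkj * T) % 1000000007) % 1000000007 = (dk + dkj * C) % 1000000007 := by
  have h1 : (dkj * T) % 1000000007 = (dkj * C) % 1000000007 := by
    rw [Int.mul_emod, hT, hC, Int.mul_emod dkj (c % 1000000007),
        Int.emod_emod_of_dvd _ dvd_rfl]
  rw [h1, Int.add_emod dk, Int.emod_emod_of_dvd _ dvd_rfl, ← Int.add_emod]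

theorem pv_modsum (l : List Int) (a : Int) (h0 : 0 ≤ a) (h1 : a < 1000000007) :
    l.foldl (fun r x => (r + x) % 1000000007) a = (a + l.sum) % 1000000007 := by
  induction l generalizing a with
  | nil => simpa using (Int.emod_eq_of_lt h0 h1).symm
  | cons x xs ih =>
    simp only [List.foldl_cons, List.sum_cons]
    rw [ih _ (Int.emod_nonneg _ (by norm_num)) (Int.emod_lt_of_pos _ (by norm_num)),
        Int.add_emod ((a+x) % 1000000007), Int.emod_emod_of_dvd _ dvd_rfl,
        ← Int.add_emod, ← add_assoc]

theorem pv_foldl_len {α : Type} (l : List α) (g : List Int → α → List Int) (dp : List Int)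
    (h : ∀ dp x, (g dp x).length = dp.length) : (l.foldl g dp).length = dp.length := by
  induction l generalizing dp with
  | nil => rfl
  | cons x xs ih => simp only [List.foldl_cons]; rw [ih, h]

-- ---- the Pascal table of port A ----

def pvEntryN (t : List (List Int)) (i j : Nat) : Int := (t.getD i []).getD j 0

def pvShape (t : List (List Int)) (n : Nat) : Prop :=
  t.length = n+1 ∧ ∀ r < n+1, (t.getD r []).length = n+1

theorem pv_entry_set (t : List (List Int)) (i j : Nat) (v : Int) (i' j' : Nat)
    (hi : i < t.length) (hj : j < (t.getD i []).length) :
    pvEntryN (pvSetEntry t i j v) i' j' =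
      if i' = i ∧ j' = j then v else pvEntryN t i' j' := by
  unfold pvEntryN pvSetEntry
  rw [pv_getD_set _ _ _ _ _ hi]
  by_cases hii : i' = i
  · rw [if_pos hii, pv_getD_set _ _ _ _ _ hj]
    by_cases hjj : j' = j
    · rw [if_pos hjj, if_pos ⟨hii, hjj⟩]
    · rw [if_neg hjj, if_neg (by tauto)]; subst hii; rfl
  · rw [if_neg hii, if_neg (by tauto)]

theorem pv_shape_set (t : List (List Int)) (n : Nat) (i j : Nat) (v : Int)
    (hs : pvShape t n) (hi : i < n+1) : pvShape (pvSetEntry t i j v) n := by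
  obtain ⟨hl, hr⟩ := hs
  refine ⟨by simp [pvSetEntry, hl], fun r hrn => ?_⟩
  rw [pvSetEntry, pv_getD_set _ _ _ _ _ (by omega)]
  by_cases hri : r = i
  · rw [if_pos hri, List.length_set]; subst hri; exact hr r hrn
  · rw [if_neg hri]; exact hr r hrn

def pvRowFold (t : List (List Int)) (i m : Nat) : List (List Int) :=
  (List.range m).foldl (fun t j => pvBCStep t i j) t

theorem pv_rowfold_inv (n i : Nat) (hin : i ≤ n) (t : List (List Int)) (hs : pvShape t n)
    (hprev : ∀ j ≤ i-1, 1 ≤ i → pvEntryN t (i-1) j % 1000000007 = ((i-1).choose j : Int) % 1000000007)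
    (m : Nat) (hm : m ≤ i+1) :
    pvShape (pvRowFold t i m) n ∧
    (∀ i' j', i' ≠ i → pvEntryN (pvRowFold t i m) i' j' = pvEntryN t i' j') ∧
    (∀ j', m ≤ j' → pvEntryN (pvRowFold t i m) i j' = pvEntryN t i j') ∧
    (∀ j' < m, pvEntryN (pvRowFold t i m) i j' % 1000000007 = (i.choose j' : Int) % 1000000007) := by
  induction m with
  | zero => exact ⟨hs, fun _ _ _ => rfl, fun _ _ => rfl, fun j hj => by omega⟩
  | succ m ih =>
    have hmi : m ≤ i := by omega
    obtain ⟨ihs, ihne, ihge, ihlt⟩ := ih (by omega)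
    have hstep : pvRowFold t i (m+1) = pvBCStep (pvRowFold t i m) i m := by
      unfold pvRowFold; rw [List.range_succ, List.foldl_append]; rfl
    have hi' : i < (pvRowFold t i m).length := by rw [ihs.1]; omega
    have hj' : m < ((pvRowFold t i m).getD i []).length := by rw [ihs.2 i (by omega)]; omega
    have hkey : ∃ v, pvBCStep (pvRowFold t i m) i m = pvSetEntry (pvRowFold t i m) i m v ∧
        v % 1000000007 = ((i.choose m : Nat) : Int) % 1000000007 := by
      unfold pvBCStep
      by_cases hb1 : m = 0 ∨ m = i
      · refine ⟨1, by rw [if_pos hb1], ?_⟩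
        rcases hb1 with h | h <;> subst h <;> simp
      · rw [if_neg hb1]
        by_cases hb2 : m = 1
        · refine ⟨(i : Int), by rw [if_pos hb2], ?_⟩
          subst hb2; rw [Nat.choose_one_right]
        · rw [if_neg hb2]
          refine ⟨_, rfl, ?_⟩
          have hm2 : 2 ≤ m := by omega
          have hmi' : m < i := by omega
          have hx : pvEntryN (pvRowFold t i m) (i-1) m = pvEntryN t (i-1) m :=
            ihne _ _ (by omega)
          have hy : pvEntryN (pvRowFold t i m) (i-1) (m-1) = pvEntryN t (i-1) (m-1) :=
            ihne _ _ (by omega)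
          have hx' := hprev m (by omega) (by omega)
          have hy' := hprev (m-1) (by omega) (by omega)
          have hcs : (i.choose m : Nat) = (i-1).choose (m-1) + (i-1).choose m := by
            have h1 : i = (i-1)+1 := by omega
            have h2 : m = (m-1)+1 := by omega
            conv_lhs => rw [h1, h2]
            rw [Nat.choose_succ_succ, (by omega : Nat.succ (m-1) = m)]
          show ((pvEntryN (pvRowFold t i m) (i-1) m + pvEntryN (pvRowFold t i m) (i-1) (m-1))
                  % 1000000007) % 1000000007 = _
          rw [Int.emod_emod_of_dvd _ dvd_rfl, Int.add_emod, hx, hy, hx', hy',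
              ← Int.add_emod, hcs]
          push_cast
          ring_nf
    obtain ⟨v, hv, hvc⟩ := hkey
    rw [hstep, hv]
    refine ⟨pv_shape_set _ _ _ _ _ ihs (by omega), ?_, ?_, ?_⟩
    · intro i' j' hne
      rw [pv_entry_set _ _ _ _ _ _ hi' hj', if_neg (fun h => hne h.1)]
      exact ihne i' j' hne
    · intro j' hj'ge
      rw [pv_entry_set _ _ _ _ _ _ hi' hj', if_neg (by rintro ⟨_, rfl⟩; omega)]
      exact ihge j' (by omega)
    · intro j' hj'lt
      by_cases hjm : j' = m
      · subst hjm
        rw [pv_entry_set _ _ _ _ _ _ hi' hj', if_pos ⟨rfl, rfl⟩]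
        exact hvc
      · rw [pv_entry_set _ _ _ _ _ _ hi' hj', if_neg (fun h => hjm h.2)]
        exact ihlt j' (by omega)

theorem pv_tbl_char (n : Nat) :
    pvShape (pvBC n) n ∧
    ∀ i j, i ≤ n → j ≤ i →
      pvEntryN (pvBC n) i j % 1000000007 = ((i.choose j : Nat) : Int) % 1000000007 := by
  suffices h : ∀ m ≤ n+1,
      pvShape ((List.range m).foldl (fun t i => pvBCRow t i)
        (List.replicate (n+1) (List.replicate (n+1) (0 : Int)))) n ∧
      ∀ i j, i < m → j ≤ i →
        pvEntryN ((List.range m).foldl (fun t i => pvBCRow t i)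
          (List.replicate (n+1) (List.replicate (n+1) (0 : Int)))) i j % 1000000007
          = ((i.choose j : Nat) : Int) % 1000000007 by
    obtain ⟨h1, h2⟩ := h (n+1) (le_refl _)
    exact ⟨h1, fun i j hi hj => h2 i j (by omega) hj⟩
  intro m
  induction m with
  | zero =>
    intro _
    simp only [List.range_zero, List.foldl_nil]
    refine ⟨⟨List.length_replicate, fun r hr => ?_⟩, fun i j hi _ => by omega⟩
    rw [List.getD_replicate _ hr]; exact List.length_replicate
  | succ m ih =>
    intro hm
    obtain ⟨ihs, ihc⟩ := ih (by omega)
    have hstep : (List.range (m+1)).foldl (fun t i => pvBCRow t i)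
        (List.replicate (n+1) (List.replicate (n+1) (0 : Int)))
        = pvBCRow ((List.range m).foldl (fun t i => pvBCRow t i)
            (List.replicate (n+1) (List.replicate (n+1) (0 : Int)))) m := by
      rw [List.range_succ, List.foldl_append]; rfl
    have hprev : ∀ j ≤ m-1, 1 ≤ m →
        pvEntryN ((List.range m).foldl (fun t i => pvBCRow t i)
          (List.replicate (n+1) (List.replicate (n+1) (0 : Int)))) (m-1) j % 1000000007
        = (((m-1).choose j : Nat) : Int) % 1000000007 :=
      fun j hj h1 => ihc (m-1) j (by omega) hj
    obtain ⟨rs, rne, _, rlt⟩ := pv_rowfold_inv n m (by omega) _ ihs hprev (m+1) (le_refl _)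
    rw [hstep]
    refine ⟨rs, fun i j hi hj => ?_⟩
    by_cases him : i = m
    · subst him
      exact rlt j (by omega)
    · show pvEntryN (pvRowFold _ m (m+1)) i j % 1000000007 = _
      rw [rne i j him]
      exact ihc i j (by omega) hj

theorem pv_entryI_eq (t : List (List Int)) (i j : Int) (hi : 0 ≤ i) (hj : 0 ≤ j) :
    pvEntryI t i j = pvEntryN t i.toNat j.toNat := by
  unfold pvEntryI pvEntryN
  conv_lhs => rw [← Int.toNat_of_nonneg hi, ← Int.toNat_of_nonneg hj]
  rw [PySem.List.pyGetD_natCast, PySem.List.pyGetD_natCast]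

-- ---- the multiplicative comb of port B ----

theorem pv_combfold (a m : Nat) (hm : m ≤ a) :
    (PySem.List.pyRange 0 (m : Int)).foldl
      (fun num t => PySem.Int.floordiv (num * ((a : Int) - t)) (t + 1)) 1
    = ((a.choose m : Nat) : Int) := by
  induction m with
  | zero => simp [PySem.List.pyRange_one_eq_nil (le_refl 0)]
  | succ m ih =>
    have hma : m ≤ a := by omega
    have hcast : ((m+1 : Nat) : Int) = (m : Int) + 1 := by push_cast; ring
    rw [hcast, PySem.List.pyRange_one_succ_right (by exact_mod_cast Nat.zero_le m),
        List.foldl_append, ih hma]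
    simp only [List.foldl_cons, List.foldl_nil]
    have h1 : ((a.choose m : Nat) : Int) * ((a:Int) - (m:Int)) = ((a.choose m * (a - m) : Nat) : Int) := by
      push_cast [Nat.cast_sub hma]; ring
    rw [h1, (by push_cast; ring : ((m:Int) + 1) = ((m+1 : Nat) : Int)), PySem.Int.floordiv_natCast]
    congr 1
    rw [← Nat.choose_succ_right_eq, Nat.mul_div_cancel _ (by omega)]

theorem pv_combEq (a b : Nat) (hb : b ≤ a) :
    pvComb (a : Int) (b : Int) = ((a.choose b : Nat) : Int) % 1000000007 := by
  unfold pvComb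
  by_cases h : (b : Int) > (a : Int) - (b : Int)
  · rw [if_pos h]; dsimp only
    have hab : ((a : Int) - (b : Int)) = ((a - b : Nat) : Int) := by push_cast [Nat.cast_sub hb]; ring
    rw [hab, pv_combfold a (a-b) (by omega), Nat.choose_symm hb]
  · rw [if_neg h]; dsimp only; rw [pv_combfold a b hb]

theorem pv_combEqI (k j : Int) (hj : 0 ≤ j) (hk : j ≤ k) :
    pvComb k j = ((k.toNat.choose j.toNat : Nat) : Int) % 1000000007 := by
  rw [← Int.toNat_of_nonneg (le_trans hj hk), ← Int.toNat_of_nonneg hj]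
  exact pv_combEq _ _ (by omega)

-- ---- frequencies ----

theorem pv_freqB_step_nonneg (cs : List Char) (fb : List Int) (h : ∀ x ∈ fb, 0 ≤ x) :
    ∀ x ∈ cs.foldl (fun fq ch =>
        PySem.List.pySetD fq (ch.toNat : Int) (PySem.List.pyGetD fq (ch.toNat : Int) 0 + 1)) fb,
      0 ≤ x := by
  induction cs generalizing fb with
  | nil => exact h
  | cons ch cs ih =>
    simp only [List.foldl_cons]
    apply ih
    intro x hx
    rw [PySem.List.pySetD_natCast] at hx
    rcases List.mem_or_eq_of_mem_set hx with h1 | h1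
    · exact h x h1
    · subst h1; have := pv_getD_nonneg fb (ch.toNat : Int) h; omega

theorem pv_freqB_nonneg (cs : List Char) : ∀ x ∈ pvFreqB cs, 0 ≤ x := by
  unfold pvFreqB
  exact pv_freqB_step_nonneg cs _ (by intro x hx; rw [List.eq_of_mem_replicate hx])

theorem pv_freqAB_gen (cs : List Char) (hdom : ∀ ch ∈ cs, ch.toNat < 256)
    (fb : List Int) (hlen : fb.length = 256) :
    cs.foldl (fun st ch =>
      if ch ≠ '0' then
        (PySem.List.pySetD st.1 (ch.toNat : Int)
           (PySem.List.pyGetD st.1 (ch.toNat : Int) 0 + 1), st.2)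
      else (st.1, st.2 + 1)) (fb.set 48 0, fb.getD 48 0)
    = ((cs.foldl (fun fq ch =>
          PySem.List.pySetD fq (ch.toNat : Int) (PySem.List.pyGetD fq (ch.toNat : Int) 0 + 1)) fb).set 48 0,
       (cs.foldl (fun fq ch =>
          PySem.List.pySetD fq (ch.toNat : Int) (PySem.List.pyGetD fq (ch.toNat : Int) 0 + 1)) fb).getD 48 0) := by
  induction cs generalizing fb with
  | nil => rfl
  | cons ch cs ih =>
    have hd : ch.toNat < 256 := hdom ch (by simp)
    have hdom' : ∀ c ∈ cs, c.toNat < 256 := fun c hc => hdom c (by simp [hc])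
    simp only [List.foldl_cons, PySem.List.pySetD_natCast, PySem.List.pyGetD_natCast]
    by_cases h0 : ch = '0'
    · subst h0
      rw [if_neg (by simp)]
      have e48 : ('0' : Char).toNat = 48 := rfl
      have e1 : (fb.set 48 0) =
          (fb.set ('0' : Char).toNat (fb.getD ('0' : Char).toNat 0 + 1)).set 48 0 := by
        rw [e48, List.set_set]
      have e2 : fb.getD 48 0 + 1 =
          (fb.set ('0' : Char).toNat (fb.getD ('0' : Char).toNat 0 + 1)).getD 48 0 := by
        rw [e48, pv_getD_set _ _ _ _ _ (by simp [hlen]), if_pos rfl]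
      have h' := ih hdom' (fb.set ('0' : Char).toNat (fb.getD ('0' : Char).toNat 0 + 1))
        (by rw [List.length_set, hlen])
      simp only [PySem.List.pySetD_natCast, PySem.List.pyGetD_natCast] at h'
      rw [← e1, ← e2] at h'
      exact h'
    · rw [if_pos (by simpa using h0)]
      have hc : ch.toNat ≠ 48 := pv_char_ne h0
      have e1 : (fb.set 48 0).getD ch.toNat 0 = fb.getD ch.toNat 0 := by
        rw [pv_getD_set _ _ _ _ _ (by omega), if_neg hc]
      have e2 : (fb.set 48 0).set ch.toNat (fb.getD ch.toNat 0 + 1) =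
          (fb.set ch.toNat (fb.getD ch.toNat 0 + 1)).set 48 0 :=
        List.set_comm _ _ (fun h => hc h.symm)
      have e3 : fb.getD 48 0 =
          (fb.set ch.toNat (fb.getD ch.toNat 0 + 1)).getD 48 0 := by
        rw [pv_getD_set _ _ _ _ _ (by simpa [List.length_set, hlen] using hd), if_neg (fun h => hc h.symm)]
      have h' := ih hdom' (fb.set ch.toNat (fb.getD ch.toNat 0 + 1))
        (by rw [List.length_set, hlen])
      simp only [PySem.List.pySetD_natCast, PySem.List.pyGetD_natCast] at h'
      rw [← e2, ← e3] at h'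
      rw [e1]
      exact h'

theorem pv_freqAB (cs : List Char) (hdom : ∀ ch ∈ cs, ch.toNat < 256) :
    pvFreqA cs = ((pvFreqB cs).set 48 0, (pvFreqB cs).getD 48 0) := by
  unfold pvFreqA pvFreqB
  have h := pv_freqAB_gen cs hdom (List.replicate 256 0) List.length_replicate
  rw [List.set_replicate_self, List.getD_replicate _ (show 48 < 256 by norm_num)] at h
  exact h

-- ---- inner loops ----

theorem pv_innerA_nobreak (bc : List (List Int)) (k : Int) (dp : List Int) (js : List Int)
    (h : ∀ j ∈ js, 0 ≤ k - j) :
    pvInnerA bc k dp js = js.foldl (fun dp j =>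
      PySem.List.pySetD dp k
        ((PySem.List.pyGetD dp k 0 +
          (PySem.List.pyGetD dp (k-j) 0 * pvEntryI bc k (k-j)) % 1000000007) % 1000000007)) dp := by
  induction js generalizing dp with
  | nil => rfl
  | cons j js ih =>
    have h0 := h j (by simp)
    simp only [pvInnerA, List.foldl_cons, if_neg (by omega : ¬ (k - j < 0))]
    exact ih _ (fun x hx => h x (by simp [hx]))

theorem pv_innerA_append (bc : List (List Int)) (k : Int) (dp : List Int) (l1 l2 : List Int)
    (h : ∀ j ∈ l1, 0 ≤ k - j) :
    pvInnerA bc k dp (l1 ++ l2) = pvInnerA bc k (pvInnerA bc k dp l1) l2 := by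
  induction l1 generalizing dp with
  | nil => rfl
  | cons j js ih =>
    have h0 := h j (by simp)
    simp only [pvInnerA, List.cons_append, if_neg (by omega : ¬ (k - j < 0))]
    exact ih _ (fun x hx => h x (by simp [hx]))

theorem pv_innerZ_nobreak (bc : List (List Int)) (k : Int) (dp : List Int) (js : List Int)
    (h : ∀ j ∈ js, 0 < k - j) :
    pvInnerZ bc k dp js = js.foldl (fun dp j =>
      PySem.List.pySetD dp k
        ((PySem.List.pyGetD dp k 0 +
          (PySem.List.pyGetD dp (k-j) 0 * pvEntryI bc (k-1) (k-j-1)) % 1000000007) % 1000000007)) dp := by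
  induction js generalizing dp with
  | nil => rfl
  | cons j js ih =>
    have h0 := h j (by simp)
    simp only [pvInnerZ, List.foldl_cons, if_neg (by omega : ¬ (k - j ≤ 0))]
    exact ih _ (fun x hx => h x (by simp [hx]))

theorem pv_innerZ_append (bc : List (List Int)) (k : Int) (dp : List Int) (l1 l2 : List Int)
    (h : ∀ j ∈ l1, 0 < k - j) :
    pvInnerZ bc k dp (l1 ++ l2) = pvInnerZ bc k (pvInnerZ bc k dp l1) l2 := by
  induction l1 generalizing dp with
  | nil => rfl
  | cons j js ih =>
    have h0 := h j (by simp)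
    simp only [pvInnerZ, List.cons_append, if_neg (by omega : ¬ (k - j ≤ 0))]
    exact ih _ (fun x hx => h x (by simp [hx]))

-- per-element agreement of the two phase-1 update steps
theorem pv_stepEq1 (n : Nat) (k j : Int) (h1 : 1 ≤ j) (hjk : j ≤ k) (hkn : k ≤ (n : Int))
    (dp : List Int) :
    PySem.List.pySetD dp k
      ((PySem.List.pyGetD dp k 0 +
        (PySem.List.pyGetD dp (k-j) 0 * pvEntryI (pvBC n) k (k-j)) % 1000000007) % 1000000007)
    = PySem.List.pySetD dp k
      ((PySem.List.pyGetD dp k 0 +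
        PySem.List.pyGetD dp (k-j) 0 * pvComb k j) % 1000000007) := by
  rw [pv_entryI_eq _ _ _ (by omega) (by omega)]
  have hT := (pv_tbl_char n).2 k.toNat (k-j).toNat (by omega) (by omega)
  have hC := pv_combEqI k j (by omega) hjk
  have hsym : k.toNat.choose (k-j).toNat = k.toNat.choose j.toNat := by
    rw [(by omega : (k-j).toNat = k.toNat - j.toNat), Nat.choose_symm (by omega)]
  rw [hsym] at hT
  congr 1
  exact pv_valEq _ _ _ _ _ hT hC

theorem pv_stepEq2 (n : Nat) (k j : Int) (h1 : 1 ≤ j) (hjk : j ≤ k - 1) (hkn : k ≤ (n : Int))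
    (dp : List Int) :
    PySem.List.pySetD dp k
      ((PySem.List.pyGetD dp k 0 +
        (PySem.List.pyGetD dp (k-j) 0 * pvEntryI (pvBC n) (k-1) (k-j-1)) % 1000000007) % 1000000007)
    = PySem.List.pySetD dp k
      ((PySem.List.pyGetD dp k 0 +
        PySem.List.pyGetD dp (k-j) 0 * pvComb (k-1) j) % 1000000007) := by
  rw [pv_entryI_eq _ _ _ (by omega) (by omega)]
  have hT := (pv_tbl_char n).2 (k-1).toNat (k-j-1).toNat (by omega) (by omega)
  have hC := pv_combEqI (k-1) j (by omega) hjk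
  have hsym : (k-1).toNat.choose (k-j-1).toNat = (k-1).toNat.choose j.toNat := by
    rw [(by omega : (k-j-1).toNat = (k-1).toNat - j.toNat), Nat.choose_symm (by omega)]
  rw [hsym] at hT
  congr 1
  exact pv_valEq _ _ _ _ _ hT hC

theorem pv_innerAEq (n : Nat) (k f : Int) (hk : 0 ≤ k) (hkn : k ≤ (n : Int)) (_hf : 0 ≤ f)
    (dp : List Int) :
    pvInnerA (pvBC n) k dp (PySem.List.pyRange 1 (f+1)) =
    (PySem.List.pyRange 1 (min f k + 1)).foldl
      (fun dp j =>
        PySem.List.pySetD dp k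
          ((PySem.List.pyGetD dp k 0 +
            PySem.List.pyGetD dp (k-j) 0 * pvComb k j) % 1000000007)) dp := by
  rcases le_or_gt f k with hfk | hkf
  · rw [min_eq_left hfk,
        pv_innerA_nobreak _ _ _ _ (fun j hj => by rw [PySem.List.mem_pyRange_one] at hj; omega)]
    exact PySem.List.foldl_congr_mem _ _ _ _ (fun dp j hj => by
      rw [PySem.List.mem_pyRange_one] at hj
      exact pv_stepEq1 n k j (by omega) (by omega) hkn dp)
  · rw [min_eq_right (le_of_lt hkf)]
    rw [PySem.List.pyRange_one_append 1 (k+1) (f+1) (by omega) (by omega),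
        pv_innerA_append _ _ _ _ _ (fun j hj => by rw [PySem.List.mem_pyRange_one] at hj; omega)]
    have htail : ∀ dp0, pvInnerA (pvBC n) k dp0 (PySem.List.pyRange (k+1) (f+1)) = dp0 := by
      intro dp0
      rw [PySem.List.pyRange_one_cons (by omega)]
      simp only [pvInnerA, if_pos (show k - (k+1) < 0 by omega)]
    rw [htail _,
        pv_innerA_nobreak _ _ _ _ (fun j hj => by rw [PySem.List.mem_pyRange_one] at hj; omega)]
    exact PySem.List.foldl_congr_mem _ _ _ _ (fun dp j hj => by
      rw [PySem.List.mem_pyRange_one] at hj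
      exact pv_stepEq1 n k j (by omega) (by omega) hkn dp)

theorem pv_innerZEq (n : Nat) (k zc : Int) (hk : 0 ≤ k) (hkn : k ≤ (n : Int)) (hz : 0 ≤ zc)
    (dp : List Int) :
    pvInnerZ (pvBC n) k dp (PySem.List.pyRange 1 (zc+1)) =
    (PySem.List.pyRange 1 (min zc (k-1) + 1)).foldl
      (fun dp j =>
        PySem.List.pySetD dp k
          ((PySem.List.pyGetD dp k 0 +
            PySem.List.pyGetD dp (k-j) 0 * pvComb (k-1) j) % 1000000007)) dp := by
  rcases le_or_gt zc (k-1) with hzk | hkz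
  · rw [min_eq_left hzk,
        pv_innerZ_nobreak _ _ _ _ (fun j hj => by rw [PySem.List.mem_pyRange_one] at hj; omega)]
    exact PySem.List.foldl_congr_mem _ _ _ _ (fun dp j hj => by
      rw [PySem.List.mem_pyRange_one] at hj
      exact pv_stepEq2 n k j (by omega) (by omega) hkn dp)
  · rw [min_eq_right (le_of_lt hkz)]
    by_cases hk0 : k = 0
    · subst hk0
      rw [PySem.List.pyRange_one_eq_nil (by omega : (0:Int) - 1 + 1 ≤ 1)]
      rcases le_or_gt zc 0 with hz0 | hz0
      · rw [PySem.List.pyRange_one_eq_nil (by omega)]; rfl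
      · rw [PySem.List.pyRange_one_cons (by omega)]
        simp only [pvInnerZ, if_pos (show (0:Int) - 1 ≤ 0 by omega), List.foldl_nil]
    · have hk1 : 1 ≤ k := by omega
      rw [PySem.List.pyRange_one_append 1 k (zc+1) (by omega) (by omega),
          pv_innerZ_append _ _ _ _ _ (fun j hj => by rw [PySem.List.mem_pyRange_one] at hj; omega)]
      have htail : ∀ dp0, pvInnerZ (pvBC n) k dp0 (PySem.List.pyRange k (zc+1)) = dp0 := by
        intro dp0
        rw [PySem.List.pyRange_one_cons (by omega)]
        simp only [pvInnerZ, if_pos (show k - k ≤ 0 by omega)]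
      rw [htail _,
          pv_innerZ_nobreak _ _ _ _ (fun j hj => by rw [PySem.List.mem_pyRange_one] at hj; omega)]
      have hrange : PySem.List.pyRange 1 k = PySem.List.pyRange 1 (k-1+1) := by norm_num
      rw [hrange]
      exact PySem.List.foldl_congr_mem _ _ _ _ (fun dp j hj => by
        rw [PySem.List.mem_pyRange_one] at hj
        exact pv_stepEq2 n k j (by omega) (by omega) hkn dp)


-- ---- phase-level equalities and assembly ----

theorem pv_freq_nonneg' (cs : List Char) :
    ∀ code : Int, 0 ≤ PySem.List.pyGetD ((pvFreqB cs).set 48 0) code 0 := by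
  intro code
  apply pv_getD_nonneg
  intro x hx
  rcases List.mem_or_eq_of_mem_set hx with h | h
  · exact pv_freqB_nonneg cs x h
  · omega

theorem pv_zc_nonneg (cs : List Char) : 0 ≤ (pvFreqB cs).getD 48 0 := by
  rw [List.getD_eq_getElem?_getD]
  cases h : (pvFreqB cs)[48]? with
  | none => simp
  | some x => simpa using pv_freqB_nonneg cs x (List.mem_of_getElem? h)

theorem pv_phase1 (n : Nat) (fq : List Int)
    (hnn : ∀ code : Int, 0 ≤ PySem.List.pyGetD fq code 0) (dp : List Int) :
    (PySem.List.pyRange 0 256).foldl (fun dp i =>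
      if PySem.List.pyGetD fq i 0 = 0 then dp
      else
        (PySem.List.pyRange (n : Int) (-1) (-1)).foldl
          (fun dp k => pvInnerA (pvBC n) k dp
            (PySem.List.pyRange 1 (PySem.List.pyGetD fq i 0 + 1)))
          dp) dp
    = (PySem.List.pyRange 0 256).foldl (fun dp code =>
      (PySem.List.pyRange (n : Int) (-1) (-1)).foldl
        (fun dp k =>
          (PySem.List.pyRange 1 (min (PySem.List.pyGetD fq code 0) k + 1)).foldl
            (fun dp j =>
              PySem.List.pySetD dp k
                ((PySem.List.pyGetD dp k 0 +
                  PySem.List.pyGetD dp (k-j) 0 * pvComb k j) % 1000000007)) dp)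
        dp) dp := by
  apply PySem.List.foldl_congr_mem
  intro dp code _
  by_cases hf0 : PySem.List.pyGetD fq code 0 = 0
  · rw [if_pos hf0, hf0]
    rw [PySem.List.foldl_congr_mem _ _ (fun dp _ => dp) _ (fun dp k hk => by
        rw [PySem.List.mem_pyRange_neg_one] at hk
        rw [min_eq_left (by omega : (0:Int) ≤ k),
            PySem.List.pyRange_one_eq_nil (by omega : (0:Int) + 1 ≤ 1)]
        rfl),
      PySem.List.foldl_ignore]
  · rw [if_neg hf0]
    apply PySem.List.foldl_congr_mem
    intro dp k hk
    rw [PySem.List.mem_pyRange_neg_one] at hk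
    exact pv_innerAEq n k _ (by omega) (by omega) (hnn code) dp

theorem pv_phase2 (n : Nat) (zc : Int) (hz : 0 ≤ zc) (dp : List Int) :
    (PySem.List.pyRange (n : Int) (-1) (-1)).foldl
      (fun dp k => pvInnerZ (pvBC n) k dp (PySem.List.pyRange 1 (zc + 1))) dp
    = (PySem.List.pyRange (n : Int) (-1) (-1)).foldl
      (fun dp k =>
        (PySem.List.pyRange 1 (min zc (k-1) + 1)).foldl
          (fun dp j =>
            PySem.List.pySetD dp k
              ((PySem.List.pyGetD dp k 0 +
                PySem.List.pyGetD dp (k-j) 0 * pvComb (k-1) j) % 1000000007)) dp) dp := by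
  apply PySem.List.foldl_congr_mem
  intro dp k hk
  rw [PySem.List.mem_pyRange_neg_one] at hk
  exact pv_innerZEq n k zc (by omega) (by omega) hz dp

theorem pv_final (n : Nat) (dp4 : List Int) (hlen : dp4.length = n+1) :
    (PySem.List.pyRange 1 ((n : Int) + 1)).foldl
      (fun r i => (r + PySem.List.pyGetD dp4 i 0) % 1000000007) 0
    = (PySem.List.slice dp4 (some 1) none).sum % 1000000007 := by
  have hb : ((n : Int) + 1) = PySem.List.len dp4 := by
    rw [PySem.List.len_eq, hlen]; push_cast; ring
  rw [hb, PySem.List.foldl_pyRange_pyGetD dp4 0 (fun r x => (r + x) % 1000000007) 0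
        (by norm_num : (0:Int) ≤ 1)]
  rw [pv_modsum _ 0 (le_refl 0) (by norm_num), zero_add, Int.toNat_one, List.drop_one,
      PySem.List.slice_from_one]

theorem pv_len2 (n : Nat) (fq : List Int) (dp : List Int) :
    ((PySem.List.pyRange 0 256).foldl (fun dp code =>
      (PySem.List.pyRange (n : Int) (-1) (-1)).foldl
        (fun dp k =>
          (PySem.List.pyRange 1 (min (PySem.List.pyGetD fq code 0) k + 1)).foldl
            (fun dp j =>
              PySem.List.pySetD dp k
                ((PySem.List.pyGetD dp k 0 +
                  PySem.List.pyGetD dp (k-j) 0 * pvComb k j) % 1000000007)) dp)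
        dp) dp).length = dp.length := by
  apply pv_foldl_len
  intro dp code
  apply pv_foldl_len
  intro dp k
  apply pv_foldl_len
  intro dp j
  exact PySem.List.length_pySetD _ _ _

theorem pv_len3 (n : Nat) (zc : Int) (dp : List Int) :
    ((PySem.List.pyRange (n : Int) (-1) (-1)).foldl
      (fun dp k =>
        (PySem.List.pyRange 1 (min zc (k-1) + 1)).foldl
          (fun dp j =>
            PySem.List.pySetD dp k
              ((PySem.List.pyGetD dp k 0 +
                PySem.List.pyGetD dp (k-j) 0 * pvComb (k-1) j) % 1000000007)) dp) dp).length
    = dp.length := by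
  apply pv_foldl_len
  intro dp k
  apply pv_foldl_len
  intro dp j
  exact PySem.List.length_pySetD _ _ _

-- ===== VERDICT (by name: the statement is the Claim_ definition above) =====
theorem countOfDistinctNo_spec : Claim_equal_countOfDistinctNo := by
  intro str hdom
  unfold Spec_countOfDistinctNo
  have hdom' : ∀ ch ∈ str.toList, ch.toNat < 256 := by
    unfold Dom_countOfDistinctNo pvDomStr at hdom
    rw [List.all_eq_true] at hdom
    intro ch hch
    have h := hdom ch hch
    unfold pvDomChar at h
    simp only [Bool.or_eq_true, Bool.and_eq_true, decide_eq_true_eq, beq_iff_eq] at h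
    omega
  have h48 : '0'.toNat = 48 := rfl
  simp only [countOfDistinctNo, countOfDistinctNo_alt, PySem.List.pySetD_natCast,
    PySem.List.pyGetD_natCast, h48, pv_freqAB str.toList hdom']
  rw [pv_phase1 str.toList.length ((pvFreqB str.toList).set 48 0)
        (pv_freq_nonneg' str.toList),
      pv_phase2 str.toList.length ((pvFreqB str.toList).getD 48 0)
        (pv_zc_nonneg str.toList)]
  apply pv_final
  by_cases hzc : (pvFreqB str.toList).getD 48 0 ≠ 0
  · rw [if_pos hzc, PySem.List.length_pySetD, pv_len3, pv_len2,
        PySem.List.length_pySetD, List.length_replicate]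
  · rw [if_neg hzc, pv_len3, pv_len2, PySem.List.length_pySetD, List.length_replicate]
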